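-- pv_equiv track=rewrite | github.com/jxtrbtk/portrait-robot | backend/SyllabInt.py | Swap_String_By2
-- ===== SOURCE A (Python) =====
-- def Swap_String_By2(string):
--     output = ""
--     buffer = ""
--     for val in string:
--         buffer += val
--         if len(buffer) == 2:
--             output = buffer + output
--             buffer = ""
--     return output
-- ===== SOURCE B (Python) =====
-- def Swap_String_By2(string):
--     out = []
--     i = len(string) - 2 - len(string) % 2
--     while i >= 0:
--         out.append(string[i:i+2])
--         i -= 2
--     return "".join(out)
-- ===== Notes on version B (the rewrite author's own statement) =====
-- stated objective: faster
-- what changed: Replaced the forward character loop with a 2-char buffer and quadratic string prepends by a backward pair-index loop that appends each 2-char slice to a list and joins once.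
import Mathlib
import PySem

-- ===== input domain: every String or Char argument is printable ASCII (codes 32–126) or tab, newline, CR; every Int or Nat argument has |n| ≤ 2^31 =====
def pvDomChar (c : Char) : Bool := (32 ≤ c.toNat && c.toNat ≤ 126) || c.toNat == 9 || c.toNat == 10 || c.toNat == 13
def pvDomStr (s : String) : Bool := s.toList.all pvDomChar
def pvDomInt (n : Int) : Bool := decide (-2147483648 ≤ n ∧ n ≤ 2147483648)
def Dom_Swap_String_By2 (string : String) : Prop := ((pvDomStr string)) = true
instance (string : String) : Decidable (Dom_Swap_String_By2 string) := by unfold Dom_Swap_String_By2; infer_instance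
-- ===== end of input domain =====

-- B walks pair start-indices backward, collecting 2-char slices and joining once, instead of A's forward loop with a 2-char buffer and output-prepend.

-- ===== PORT A =====
-- literal port of A's for-loop: state = (output, buffer); buffer += val; flush when buffer reaches length 2
def pvAStep (st : List Char × List Char) (val : Char) : List Char × List Char :=
  let buffer := st.2 ++ [val]
  if buffer.length == 2 then (buffer ++ st.1, []) else (st.1, buffer)

def Swap_String_By2 (string : String) : String :=
  String.ofList (string.toList.foldl pvAStep ([], [])).1

-- ===== PORT B =====
-- the while-loop of Source B: i walks backward by 2, out.append(string[i:i+2]); "".join(out) at the end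
def pvBLoop (cs : List Char) (i : Int) (out : List (List Char)) : List (List Char) :=
  if 0 ≤ i then
    pvBLoop cs (i - 2) (out ++ [PySem.List.slice cs (some i) (some (i + 2))])
  else out
termination_by (i + 2).toNat
decreasing_by omega

def Swap_String_By2_alt (string : String) : String :=
  String.ofList (pvBLoop string.toList ((string.toList.length : Int) - 2 -
    PySem.Int.mod (string.toList.length : Int) 2) []).flatten

-- ===== PRECONDITION & SPEC =====
def Spec_Swap_String_By2 (string : String) (out : String) : Prop := out = Swap_String_By2_alt string
instance (string : String) (out : String) : Decidable (Spec_Swap_String_By2 string out) := by unfold Spec_Swap_String_By2; infer_instance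

-- ===== CLAIM (what is proved, stated in full; the proofs are below) =====
def Claim_equal_Swap_String_By2 : Prop := ∀ (string : String), Dom_Swap_String_By2 string → Spec_Swap_String_By2 string (Swap_String_By2 string)

-- ===== LEMMAS AND PROOFS =====
-- proof-only intermediate: the pairs of the string, reversed and flattened
def pvPairsRev : List Char → List Char
  | a :: b :: rest => pvPairsRev rest ++ [a, b]
  | _ => []

theorem pvA_inv : ∀ (xs out : List Char),
    (xs.foldl pvAStep (out, [])).1 = pvPairsRev xs ++ out := by
  intro xs
  induction xs using pvPairsRev.induct with
  | case1 a b rest ih =>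
      intro out
      simp [List.foldl, pvAStep, ih, pvPairsRev]
  | case2 xs h =>
      intro out
      rcases xs with _ | ⟨a, _ | ⟨b, rest⟩⟩
      · simp [pvPairsRev]
      · simp [List.foldl, pvAStep, pvPairsRev]
      · exact absurd rfl (h a b rest)

theorem pvBLoop_neg (cs : List Char) (i : Int) (out : List (List Char)) (h : ¬ 0 ≤ i) :
    pvBLoop cs i out = out := by
  rw [pvBLoop]; simp [h]

theorem pvBLoop_step (cs : List Char) (i : Int) (out : List (List Char)) (h : 0 ≤ i) :
    pvBLoop cs i out = pvBLoop cs (i - 2) (out ++ [PySem.List.slice cs (some i) (some (i + 2))]) := by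
  rw [pvBLoop]; simp [h]

theorem pvBLoop_acc : ∀ (k : Nat) (cs : List Char) (i : Int), (i + 2).toNat ≤ k →
    ∀ (out : List (List Char)), pvBLoop cs i out = out ++ pvBLoop cs i [] := by
  intro k
  induction k with
  | zero =>
      intro cs i hk out
      rw [pvBLoop_neg cs i out (by omega), pvBLoop_neg cs i [] (by omega)]
      simp
  | succ k ih =>
      intro cs i hk out
      by_cases h : 0 ≤ i
      · rw [pvBLoop_step cs i out h, pvBLoop_step cs i [] h,
          ih cs (i - 2) (by omega), ih cs (i - 2) (by omega) ([] ++ _)]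
        simp
      · rw [pvBLoop_neg cs i out h, pvBLoop_neg cs i [] h]; simp

theorem pvBLoop_shift (a b : Char) (rest : List Char) : ∀ (k : Nat),
    pvBLoop (a :: b :: rest) ((2 * k : Nat) : Int) [] =
      pvBLoop rest ((2 * k : Nat) - 2) [] ++ [[a, b]] := by
  intro k
  induction k with
  | zero =>
      rw [pvBLoop_step _ _ _ (by simp), pvBLoop_neg _ _ _ (by omega),
        pvBLoop_neg rest _ _ (by omega)]
      simp [PySem.List.slice_to]
  | succ k ih =>
      have h1 : ((2 * (k + 1) : Nat) : Int) = ((2 * k + 2 : Nat) : Int) := by push_cast; ring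
      have h2 : ((2 * k + 2 : Nat) : Int) - 2 = ((2 * k : Nat) : Int) := by push_cast; ring
      rw [h1, pvBLoop_step _ _ _ (by positivity), h2,
        pvBLoop_acc ((2 * k : Nat) + 2) _ _ (by omega), ih,
        pvBLoop_step rest ((2 * k : Nat) : Int) [] (by positivity),
        pvBLoop_acc ((2 * k : Nat) + 2) rest _ (by omega)]
      have hs : PySem.List.slice (a :: b :: rest) (some ((2 * k + 2 : Nat) : Int))
          (some (((2 * k + 2 : Nat) : Int) + 2)) =
          PySem.List.slice rest (some ((2 * k : Nat) : Int)) (some (((2 * k : Nat) : Int) + 2)) := by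
        have e1 : (((2 * k + 2 : Nat) : Int) + 2) = ((2 * k + 4 : Nat) : Int) := by push_cast; ring
        have e2 : (((2 * k : Nat) : Int) + 2) = ((2 * k + 2 : Nat) : Int) := by push_cast; ring
        rw [e1, e2, PySem.List.slice_natCast, PySem.List.slice_natCast]
        simp
      rw [hs, pvBLoop_acc ((2 * k : Nat) + 2) rest (((2 * k : Nat) : Int) - 2) (by omega)
        ([] ++ [PySem.List.slice rest (some ((2 * k : Nat) : Int)) (some (((2 * k : Nat) : Int) + 2))])]
      simp

theorem pvBLoop_eq_pairsRev : ∀ (cs : List Char),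
    (pvBLoop cs ((cs.length : Int) - 2 - PySem.Int.mod (cs.length : Int) 2) []).flatten
      = pvPairsRev cs := by
  intro cs
  induction cs using pvPairsRev.induct with
  | case1 a b rest ih =>
      have hm : ∀ (m : Nat), PySem.Int.mod ((m : Nat) : Int) 2 = ((m % 2 : Nat) : Int) := by
        intro m; exact_mod_cast PySem.Int.mod_natCast m 2
      set k : Nat := rest.length / 2 with hk
      have hlen : (((a :: b :: rest).length : Int) - 2 -
          PySem.Int.mod ((a :: b :: rest).length : Int) 2) = ((2 * k : Nat) : Int) := by
        simp only [List.length_cons, hm]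
        have := Nat.div_add_mod rest.length 2
        have h2 : (rest.length + 1 + 1) % 2 = rest.length % 2 := by omega
        push_cast [h2]
        omega
      have hrest : ((2 * k : Nat) : Int) - 2 = ((rest.length : Int) - 2 -
          PySem.Int.mod ((rest.length : Int)) 2) := by
        simp only [hm]
        have := Nat.div_add_mod rest.length 2
        push_cast
        omega
      rw [hlen, pvBLoop_shift, hrest]
      simp only [List.flatten_append, List.flatten_cons, List.flatten_nil,
        List.append_nil, pvPairsRev, ih]
  | case2 cs h =>
      rcases cs with _ | ⟨a, _ | ⟨b, rest⟩⟩
      · have h1 : ((([] : List Char).length : Int) - 2 -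
            PySem.Int.mod (([] : List Char).length : Int) 2) = -2 := by
          simp
        rw [h1, pvBLoop_neg _ _ _ (by omega)]
        simp [pvPairsRev]
      · have h1 : ((([a] : List Char).length : Int) - 2 -
            PySem.Int.mod (([a] : List Char).length : Int) 2) = -2 := by
          simp
        rw [h1, pvBLoop_neg _ _ _ (by omega)]
        simp [pvPairsRev]
      · exact absurd rfl (h a b rest)

-- ===== VERDICT (by name: the statement is the Claim_ definition above) =====
theorem Swap_String_By2_spec : Claim_equal_Swap_String_By2 := by
  intro s _
  unfold Spec_Swap_String_By2 Swap_String_By2 Swap_String_By2_alt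
  rw [pvA_inv, pvBLoop_eq_pairsRev]
  simp
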